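-- pv_equiv track=rewrite | github.com/taurinrobinson-wq/saoriverse-console | scripts/scan_linting_status.py | check_md013
-- ===== SOURCE A (Python) =====
-- def check_md013(content: str) -> int:
--     """Count lines over 100 chars (MD013), excluding code blocks."""
--     lines = content.split('\n')
--     count = 0
--     in_code = False
--     for line in lines:
--         if line.strip().startswith('```'):
--             in_code = not in_code
--         elif not in_code and len(line) > 100:
--             count += 1
--     return count
-- ===== SOURCE B (Python) =====
-- def check_md013(content: str) -> int:
--     """Count lines over 100 chars (MD013), excluding code blocks.
--
--     Precompute-then-filter: fence flags, prefix fence counts, then count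
--     long lines whose prefix fence count is even (outside code blocks).
--     """
--     lines = content.split('\n')
--     is_fence = [ln.strip().startswith('```') for ln in lines]
--     prefix = [0]
--     for f in is_fence:
--         prefix.append(prefix[-1] + f)
--     return sum(1 for ln, f, k in zip(lines, is_fence, prefix)
--                if not f and k % 2 == 0 and len(ln) > 100)
-- ===== Notes on version B (the rewrite author's own statement) =====
-- stated objective: alternative
-- what changed: Replaced the single stateful toggle loop by a precompute-then-filter decomposition: a list of fence flags, a prefix-sum of fences, then a count of non-fence long lines whose prefix fence count is even.
import Mathlib
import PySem

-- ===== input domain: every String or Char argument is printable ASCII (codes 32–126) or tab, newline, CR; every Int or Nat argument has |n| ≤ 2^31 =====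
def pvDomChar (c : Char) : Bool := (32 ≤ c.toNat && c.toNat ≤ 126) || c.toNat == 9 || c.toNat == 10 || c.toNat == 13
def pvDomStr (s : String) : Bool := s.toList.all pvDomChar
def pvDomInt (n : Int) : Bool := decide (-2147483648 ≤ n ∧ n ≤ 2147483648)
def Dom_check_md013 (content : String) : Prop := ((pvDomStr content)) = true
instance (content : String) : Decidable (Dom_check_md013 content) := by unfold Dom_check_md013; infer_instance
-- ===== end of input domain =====

-- B replaces A's single stateful toggle loop by a precompute-then-filter pass: fence flags, a prefix sum of fences, then a count; same return value.

-- ===== PORT A =====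
-- single loop over the lines carrying (count, in_code)
def check_md013 (content : String) : Int :=
  let lines := PySem.Chars.splitOn content.toList "\n".toList
  (lines.foldl (fun (st : Int × Bool) line =>
      if PySem.Chars.startswith (PySem.Chars.strip line) "```".toList then (st.1, !st.2)
      else if !st.2 && decide (PySem.Chars.len line > 100) then (st.1 + 1, st.2)
      else st) (0, false)).1

-- ===== PORT B =====
-- fence flag of one line: line.strip().startswith('```')
def fenceB (ln : List Char) : Bool :=
  PySem.Chars.startswith (PySem.Chars.strip ln) "```".toList

-- the generator's condition: not is_fence and prefix even and len > 100
def predB (p : List Char × Bool × Nat) : Bool :=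
  !p.2.1 && p.2.2 % 2 == 0 && decide (PySem.Chars.len p.1 > 100)

-- the `prefix` list built by the loop (scanl = append-one-partial-sum-at-a-time)
def prefixB (a : Nat) (fs : List Bool) : List Nat :=
  fs.scanl (fun k f => k + (if f then 1 else 0)) a

def check_md013_alt (content : String) : Int :=
  let lines := PySem.Chars.splitOn content.toList "\n".toList
  let isFence := lines.map fenceB
  let pre := prefixB 0 isFence
  ((lines.zip (isFence.zip pre)).filter predB).length

-- ===== PRECONDITION & SPEC =====
def Spec_check_md013 (content : String) (out : Int) : Prop := out = check_md013_alt content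
instance (content : String) (out : Int) : Decidable (Spec_check_md013 content out) := by unfold Spec_check_md013; infer_instance

-- ===== CLAIM (what is proved, stated in full; the proofs are below) =====
def Claim_equal_check_md013 : Prop := ∀ (content : String), Dom_check_md013 content → Spec_check_md013 content (check_md013 content)

-- ===== LEMMAS AND PROOFS =====

-- A's loop body, named for the proof (definitionally A's inline lambda)
def stepA (st : Int × Bool) (line : List Char) : Int × Bool :=
  if fenceB line then (st.1, !st.2)
  else if !st.2 && decide (PySem.Chars.len line > 100) then (st.1 + 1, st.2)
  else st

-- B's count over a tail of the lines, the prefix sum starting at a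
def countB (a : Nat) (ls : List (List Char)) : Int :=
  ((ls.zip ((ls.map fenceB).zip (prefixB a (ls.map fenceB)))).filter predB).length

theorem countB_cons (a : Nat) (ln : List Char) (tl : List (List Char)) :
    countB a (ln :: tl) =
      (if predB (ln, fenceB ln, a) then 1 else 0) +
        countB (a + (if fenceB ln then 1 else 0)) tl := by
  by_cases h : predB (ln, fenceB ln, a) <;> simp [countB, prefixB, h] <;> omega

theorem not_mod_two_beq (a : Nat) : (!(a % 2 == 1)) = (a % 2 == 0) := by
  rcases Nat.mod_two_eq_zero_or_one a with h | h <;> simp [h]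

theorem succ_mod_two_beq (a : Nat) : (!(a % 2 == 1)) = ((a + 1) % 2 == 1) := by
  rcases Nat.mod_two_eq_zero_or_one a with h | h <;> simp [h, Nat.add_mod]

theorem md013_loop (ls : List (List Char)) (a : Nat) (c : Int) :
    (ls.foldl stepA (c, a % 2 == 1)).1 = c + countB a ls := by
  induction ls generalizing a c with
  | nil => simp [countB, prefixB]
  | cons ln tl ih =>
    rw [List.foldl_cons, countB_cons]
    by_cases hf : fenceB ln
    · have hstep : stepA (c, a % 2 == 1) ln = (c, (a + 1) % 2 == 1) := by
        rw [stepA, if_pos hf, ← succ_mod_two_beq]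
      have hpred : predB (ln, fenceB ln, a) = false := by simp [predB, hf]
      rw [hstep, hpred, if_pos hf, ih (a + 1) c]
      simp
    · have hf' : fenceB ln = false := by simpa using hf
      have hpred : predB (ln, fenceB ln, a)
          = ((a % 2 == 0) && decide (PySem.Chars.len ln > 100)) := by
        simp [predB, hf']
      by_cases hin : ((a % 2 == 0) && decide (PySem.Chars.len ln > 100)) = true
      · have hstep : stepA (c, a % 2 == 1) ln = (c + 1, a % 2 == 1) := by
          rw [stepA, if_neg hf, not_mod_two_beq, if_pos hin]
        rw [hstep, hpred, if_pos hin, if_neg hf, Nat.add_zero, ih a (c + 1)]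
        omega
      · have hin' : ((a % 2 == 0) && decide (PySem.Chars.len ln > 100)) = false := by
          simpa using hin
        have hstep : stepA (c, a % 2 == 1) ln = (c, a % 2 == 1) := by
          rw [stepA, if_neg hf, not_mod_two_beq, hin', if_neg (by simp)]
        rw [hstep, hpred, hin', if_neg (by simp), if_neg hf, Nat.add_zero, ih a c]
        omega

-- ===== VERDICT (by name: the statement is the Claim_ definition above) =====
theorem check_md013_spec : Claim_equal_check_md013 := by
  intro content _
  show check_md013 content = check_md013_alt content
  have h := md013_loop (PySem.Chars.splitOn content.toList "\n".toList) 0 0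
  rw [zero_add] at h
  exact h
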